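-- pv_equiv track=rewrite | github.com/rasousa/Project1 | project1.py | countPerClass
-- ===== SOURCE A (Python) =====
-- def countPerClass(data):
--     countIE = 0
--     countEI = 0
--     countN = 0
--     for row in data:
--         val = row[2]
--         if val == "IE":
--             countIE += 1
--         elif val == "EI":
--             countEI += 1
--         elif val == "N":
--             countN += 1
--         else:
--             countN += 1
--     return [countIE, countEI, countN]
-- ===== SOURCE B (Python) =====
-- def countPerClass(data):
--     labels = [row[2] for row in data]
--     countIE = labels.count("IE")
--     countEI = labels.count("EI")
--     return [countIE, countEI, len(labels) - countIE - countEI]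
-- ===== Notes on version B (the rewrite author's own statement) =====
-- stated objective: idiomatic
-- what changed: B replaces the single-pass if/elif counter loop by staged passes: it first extracts the label column with a comprehension, then uses list.count for 'IE' and 'EI' and derives the third count from len by complement.
import Mathlib
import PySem

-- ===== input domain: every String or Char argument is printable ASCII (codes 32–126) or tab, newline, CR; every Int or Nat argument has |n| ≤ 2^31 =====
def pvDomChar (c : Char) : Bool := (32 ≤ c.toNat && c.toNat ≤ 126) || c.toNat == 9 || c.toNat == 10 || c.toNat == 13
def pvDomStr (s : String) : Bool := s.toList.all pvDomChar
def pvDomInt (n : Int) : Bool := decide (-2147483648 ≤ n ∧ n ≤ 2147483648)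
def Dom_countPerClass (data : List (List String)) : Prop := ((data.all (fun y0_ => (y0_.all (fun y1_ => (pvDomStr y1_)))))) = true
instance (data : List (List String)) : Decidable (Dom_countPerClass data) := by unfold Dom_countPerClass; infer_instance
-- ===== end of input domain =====

-- B extracts the label column first and counts with list.count; same return value wherever A returns.

-- ===== PORT A =====
-- loop over rows with counters (countIE, countEI, countN); row[2] may raise IndexError → Option
def countPerClassGoA : List (List String) → Int → Int → Int → Option (List Int)
  | [], ie, ei, n => some [ie, ei, n]
  | row :: rest, ie, ei, n =>
    match PySem.List.pyGet? row 2 with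
    | none => none
    | some val =>
      if val == "IE" then countPerClassGoA rest (ie + 1) ei n
      else if val == "EI" then countPerClassGoA rest ie (ei + 1) n
      else if val == "N" then countPerClassGoA rest ie ei (n + 1)
      else countPerClassGoA rest ie ei (n + 1)

def countPerClass (data : List (List String)) : List Int :=
  (countPerClassGoA data 0 0 0).getD []

-- ===== PORT B =====
-- labels = [row[2] for row in data]; row[2] may raise IndexError → Option via mapM
def countPerClass_alt (data : List (List String)) : List Int :=
  match data.mapM (fun row => PySem.List.pyGet? row 2) with
  | none => []
  | some labels =>
    let countIE : Int := PySem.List.count labels "IE"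
    let countEI : Int := PySem.List.count labels "EI"
    [countIE, countEI, (labels.length : Int) - countIE - countEI]

-- ===== PRECONDITION & SPEC =====
-- Pre_ excludes rows shorter than 3 entries, on which both A and B raise IndexError at row[2].
def Pre_countPerClass (data : List (List String)) : Prop := ∀ row ∈ data, 3 ≤ row.length
instance (data : List (List String)) : Decidable (Pre_countPerClass data) := by unfold Pre_countPerClass; infer_instance

def pvWitness_countPerClass : List (List String) := [["a", "b", "IE"], ["c", "d", "N"]]

def Spec_countPerClass (data : List (List String)) (out : List Int) : Prop := out = countPerClass_alt data
instance (data : List (List String)) (out : List Int) : Decidable (Spec_countPerClass data out) := by unfold Spec_countPerClass; infer_instance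

-- ===== CLAIM (what is proved, stated in full; the proofs are below) =====
def Claim_equal_countPerClass : Prop := ∀ (data : List (List String)), Dom_countPerClass data → Pre_countPerClass data → Spec_countPerClass data (countPerClass data)

-- ===== LEMMAS AND PROOFS =====
theorem countPerClassGo_counts (data : List (List String)) : ∀ ie ei n : Int,
    countPerClassGoA data ie ei n =
      (data.mapM (fun row => PySem.List.pyGet? row 2)).map
        (fun labels =>
          [ie + PySem.List.count labels "IE",
           ei + PySem.List.count labels "EI",
           n + ((labels.length : Int)
                  - PySem.List.count labels "IE" - PySem.List.count labels "EI")]) := by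
  induction data with
  | nil => intro ie ei n; simp [countPerClassGoA, PySem.List.count]
  | cons row rest ih =>
    intro ie ei n
    simp only [countPerClassGoA, List.mapM_cons]
    cases h : PySem.List.pyGet? row 2 with
    | none => simp
    | some val =>
      dsimp only
      cases hm : rest.mapM (fun row => PySem.List.pyGet? row 2) with
      | none => split_ifs <;> rw [ih] <;> simp [hm]
      | some labels =>
        split_ifs with h1 h2 h3
        · have e : val = "IE" := by simpa using h1
          subst e; rw [ih]
          simp [hm, PySem.List.count]
          omega
        · have e : val = "EI" := by simpa using h2
          subst e; rw [ih]
          simp [hm, PySem.List.count]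
          omega
        · have e : val = "N" := by simpa using h3
          subst e; rw [ih]
          simp [hm, PySem.List.count]
          omega
        · simp only [Bool.not_eq_true] at h1 h2 h3
          rw [ih]
          simp [hm, PySem.List.count, List.count_cons, h1, h2]
          omega

-- ===== VERDICT (by name: the statement is the Claim_ definition above) =====
theorem countPerClass_spec : Claim_equal_countPerClass := by
  intro data _ _
  unfold Spec_countPerClass countPerClass countPerClass_alt
  rw [countPerClassGo_counts]
  cases data.mapM (fun row => PySem.List.pyGet? row 2) with
  | none => rfl
  | some labels => simp
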